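-- pv_equiv track=rewrite | github.com/tommy5410/ppp2025 | hw10/weather_class_during.py | events_rainfall
-- ===== SOURCE A (Python) =====
-- def events_rainfall(rainfalls):
--     events = []
--     continued_rainfalls = 0
--     for rain in rainfalls:
--         if rain > 0:
--             continued_rainfalls += rain
--         else:
--             if continued_rainfalls > 0:
--                 events.append(continued_rainfalls)
--             continued_rainfalls = 0
--     if continued_rainfalls > 0:
--         events.append(continued_rainfalls)
--     return events
-- ===== SOURCE B (Python) =====
-- def events_rainfall(rainfalls):
--     # Run-splitting: scan for maximal runs of positive values and sum each run;
--     # no running accumulator or trailing flush is needed.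
--     events = []
--     i, n = 0, len(rainfalls)
--     while i < n:
--         if rainfalls[i] > 0:
--             j = i
--             while j < n and rainfalls[j] > 0:
--                 j += 1
--             events.append(sum(rainfalls[i:j]))
--             i = j
--         else:
--             i += 1
--     return events
-- ===== Notes on version B (the rewrite author's own statement) =====
-- stated objective: alternative
-- what changed: B splits the list into maximal runs of positive values and sums each run in place, replacing A's running accumulator with its sentinel reset and post-loop flush.
import Mathlib
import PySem

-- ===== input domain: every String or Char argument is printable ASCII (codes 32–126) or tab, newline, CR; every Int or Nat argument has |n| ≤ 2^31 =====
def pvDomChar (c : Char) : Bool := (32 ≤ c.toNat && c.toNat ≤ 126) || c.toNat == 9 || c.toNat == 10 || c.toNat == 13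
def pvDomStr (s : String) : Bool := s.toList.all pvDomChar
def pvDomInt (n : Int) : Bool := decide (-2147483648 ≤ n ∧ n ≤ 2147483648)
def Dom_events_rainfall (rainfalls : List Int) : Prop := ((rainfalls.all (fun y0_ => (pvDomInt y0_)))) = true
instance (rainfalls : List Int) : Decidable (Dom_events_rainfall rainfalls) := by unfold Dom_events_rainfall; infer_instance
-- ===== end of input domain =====

-- B replaces A's running accumulator (with sentinel reset and post-loop flush) by
-- splitting the list into maximal positive runs and summing each run ("alternative").

-- ===== PORT A =====
-- literal port of A: fold carrying (events, continued_rainfalls), then the final flush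
def events_rainfall (rainfalls : List Int) : List Int :=
  let p := rainfalls.foldl
    (fun (s : List Int × Int) rain =>
      if rain > 0 then (s.1, s.2 + rain)
      else if s.2 > 0 then (s.1 ++ [s.2], 0) else (s.1, 0))
    ([], 0)
  if p.2 > 0 then p.1 ++ [p.2] else p.1

-- ===== PORT B =====
-- literal port of B: at a positive element take the maximal positive run
-- (inner while-loop = takeWhile/dropWhile), sum it, continue after it
def events_rainfall_alt (rainfalls : List Int) : List Int :=
  match rainfalls with
  | [] => []
  | x :: xs =>
    if 0 < x then
      ((x :: xs).takeWhile (fun r => 0 < r)).sum ::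
        events_rainfall_alt ((x :: xs).dropWhile (fun r => 0 < r))
    else
      events_rainfall_alt xs
termination_by rainfalls.length
decreasing_by
  · simp_all
    exact List.length_dropWhile_le _ _
  · simp

-- ===== PRECONDITION & SPEC =====
def Spec_events_rainfall (rainfalls : List Int) (out : List Int) : Prop := out = events_rainfall_alt rainfalls
instance (rainfalls : List Int) (out : List Int) : Decidable (Spec_events_rainfall rainfalls out) := by unfold Spec_events_rainfall; infer_instance

-- ===== CLAIM (what is proved, stated in full; the proofs are below) =====
def Claim_equal_events_rainfall : Prop := ∀ (rainfalls : List Int), Dom_events_rainfall rainfalls → Spec_events_rainfall rainfalls (events_rainfall rainfalls)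

-- ===== LEMMAS AND PROOFS =====

-- invariant: A's fold-and-flush starting from (ev, c) with 0 ≤ c equals ev followed by
-- the run decomposition, where a pending positive c merges into the leading positive run
theorem events_rainfall_invariant (l : List Int) : ∀ (ev : List Int) (c : Int), 0 ≤ c →
    (let p := l.foldl
      (fun (s : List Int × Int) rain =>
        if rain > 0 then (s.1, s.2 + rain)
        else if s.2 > 0 then (s.1 ++ [s.2], 0) else (s.1, 0))
      (ev, c)
    if p.2 > 0 then p.1 ++ [p.2] else p.1)
    = ev ++ (if 0 < c
        then (c + (l.takeWhile (fun r => 0 < r)).sum) :: events_rainfall_alt (l.dropWhile (fun r => 0 < r))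
        else events_rainfall_alt l) := by
  induction l with
  | nil =>
    intro ev c hc
    simp [events_rainfall_alt]
    split_ifs <;> simp
  | cons x xs ih =>
    intro ev c hc
    by_cases hx : 0 < x
    · have h1 : 0 ≤ c + x := by omega
      have h2 : 0 < c + x := by omega
      simp only [List.foldl_cons, if_pos hx, gt_iff_lt]
      rw [ih ev (c + x) h1]
      rw [if_pos h2]
      rw [List.takeWhile_cons_of_pos (by simpa using hx), List.dropWhile_cons_of_pos (by simpa using hx)]
      by_cases hc0 : 0 < c
      · rw [if_pos hc0]
        simp only [List.append_cancel_left_eq, List.cons.injEq, List.sum_cons]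
        exact ⟨by ring, trivial⟩
      · have hc' : c = 0 := by omega
        rw [if_neg hc0]
        subst hc'
        rw [events_rainfall_alt]
        simp only [if_pos hx]
        rw [List.takeWhile_cons_of_pos (by simpa using hx), List.dropWhile_cons_of_pos (by simpa using hx)]
        simp
    · simp only [List.foldl_cons, gt_iff_lt, if_neg hx]
      have hdrop : (x :: xs).dropWhile (fun r => 0 < r) = x :: xs := by
        rw [List.dropWhile_cons_of_neg (by simpa using hx)]
      have halt : events_rainfall_alt (x :: xs) = events_rainfall_alt xs := by
        rw [events_rainfall_alt]; simp [hx]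
      by_cases hc0 : 0 < c
      · rw [if_pos hc0]
        rw [ih (ev ++ [c]) 0 le_rfl]
        rw [if_pos hc0, List.takeWhile_cons_of_neg (by simpa using hx), hdrop, halt]
        simp
      · rw [if_neg hc0]
        rw [ih ev 0 le_rfl]
        simp [if_neg hc0, halt]

-- ===== VERDICT (by name: the statement is the Claim_ definition above) =====
theorem events_rainfall_spec : Claim_equal_events_rainfall := by
  intro l _
  unfold Spec_events_rainfall events_rainfall
  have h := events_rainfall_invariant l [] 0 le_rfl
  simpa using h
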